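-- pv_equiv track=rewrite | github.com/abTEM/abTEM | abtem/measurements.py | _infer_lines
-- ===== SOURCE A (Python) =====
-- def _infer_lines(b, H, W, out_H, out_W, kH, kW):
--     target_size = 2**17
--     line_size = b * (H * W // out_H + kH * kW * out_W)
--     target_lines = target_size // line_size
--
--     if target_lines < out_H:
--         lines = 1
--         while True:
--             next_lines = lines * 2
--             if next_lines > target_lines:
--                 break
--             lines = next_lines
--     else:
--         lines = out_H
--
--     return lines
-- ===== SOURCE B (Python) =====
-- def _infer_lines(b, H, W, out_H, out_W, kH, kW):
--     # how many output lines fit in a 128 KiB tile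
--     target_lines = 131072 // (b * (H * W // out_H + kH * kW * out_W))
--     if target_lines >= out_H:
--         return out_H
--     # largest power of two not exceeding target_lines, floored at 1
--     return 1 << max(target_lines, 1).bit_length() - 1
-- ===== Notes on version B (the rewrite author's own statement) =====
-- stated objective: idiomatic
-- what changed: The doubling while-loop searching for the largest power of two not exceeding target_lines is replaced by the closed-form bit computation 1 << (max(target_lines,1).bit_length()-1); the sizing arithmetic is inlined into one expression and the branch is flipped into an early return.
import Mathlib
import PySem

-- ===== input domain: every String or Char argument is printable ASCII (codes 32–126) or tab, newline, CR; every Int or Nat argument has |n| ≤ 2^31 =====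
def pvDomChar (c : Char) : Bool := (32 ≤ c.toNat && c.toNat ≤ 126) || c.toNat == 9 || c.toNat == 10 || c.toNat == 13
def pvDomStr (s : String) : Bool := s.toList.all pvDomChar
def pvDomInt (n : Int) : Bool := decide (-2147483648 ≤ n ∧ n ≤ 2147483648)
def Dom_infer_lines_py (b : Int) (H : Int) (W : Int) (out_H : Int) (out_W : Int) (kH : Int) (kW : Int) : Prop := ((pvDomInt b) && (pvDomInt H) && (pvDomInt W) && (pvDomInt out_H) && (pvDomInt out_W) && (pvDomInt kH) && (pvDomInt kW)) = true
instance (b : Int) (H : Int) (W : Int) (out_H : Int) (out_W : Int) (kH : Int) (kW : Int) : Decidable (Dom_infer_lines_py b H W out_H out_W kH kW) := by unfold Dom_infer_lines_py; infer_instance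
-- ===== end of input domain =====

-- B inlines the sizing arithmetic into one expression, flips the branch into an early
-- return, and replaces A's doubling while-loop by the closed-form bit computation
-- 1 << (max(target_lines,1).bit_length()-1); same value everywhere A returns.


-- ===== PORT A =====
-- A's 'while True: next_lines = lines*2; if next_lines > target_lines: break; lines = next_lines'.
-- The 'lines ≤ 0' disjunct only makes the recursion total; the loop is entered with lines = 1 > 0.
def inferLinesLoop (target_lines : Int) (lines : Int) : Int :=
  if 2 * lines > target_lines ∨ lines ≤ 0 then lines
  else inferLinesLoop target_lines (2 * lines)
termination_by (target_lines - lines).toNat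
decreasing_by omega

def infer_lines_py (b : Int) (H : Int) (W : Int) (out_H : Int) (out_W : Int) (kH : Int) (kW : Int) : Int :=
  let target_size : Int := 2 ^ 17
  let line_size := b * (PySem.Int.floordiv (H * W) out_H + kH * kW * out_W)
  let target_lines := PySem.Int.floordiv target_size line_size
  if target_lines < out_H then inferLinesLoop target_lines 1
  else out_H

-- ===== PORT B =====
-- '1 << n' (n ≥ 0, a Nat here) is ported as 2 ^ n, which is exact for nonnegative shifts.
def infer_lines_py_alt (b : Int) (H : Int) (W : Int) (out_H : Int) (out_W : Int) (kH : Int) (kW : Int) : Int :=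
  let target_lines :=
    PySem.Int.floordiv 131072 (b * (PySem.Int.floordiv (H * W) out_H + kH * kW * out_W))
  if out_H ≤ target_lines then out_H
  else (2 : Int) ^ (PySem.Int.bitLength (max target_lines 1) - 1)

-- ===== PRECONDITION & SPEC =====
-- Pre_ excludes exactly the inputs where A raises ZeroDivisionError: out_H = 0 or line_size = 0.
def Pre_infer_lines_py (b : Int) (H : Int) (W : Int) (out_H : Int) (out_W : Int) (kH : Int) (kW : Int) : Prop :=
  out_H ≠ 0 ∧ b * (PySem.Int.floordiv (H * W) out_H + kH * kW * out_W) ≠ 0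
instance (b : Int) (H : Int) (W : Int) (out_H : Int) (out_W : Int) (kH : Int) (kW : Int) : Decidable (Pre_infer_lines_py b H W out_H out_W kH kW) := by unfold Pre_infer_lines_py; infer_instance

def pvWitness_infer_lines_py : Int × Int × Int × Int × Int × Int × Int := (1, 8, 8, 4, 4, 3, 3)

def Spec_infer_lines_py (b : Int) (H : Int) (W : Int) (out_H : Int) (out_W : Int) (kH : Int) (kW : Int) (out : Int) : Prop := out = infer_lines_py_alt b H W out_H out_W kH kW
instance (b : Int) (H : Int) (W : Int) (out_H : Int) (out_W : Int) (kH : Int) (kW : Int) (out : Int) : Decidable (Spec_infer_lines_py b H W out_H out_W kH kW out) := by unfold Spec_infer_lines_py; infer_instance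

-- ===== CLAIM (what is proved, stated in full; the proofs are below) =====
def Claim_equal_infer_lines_py : Prop := ∀ (b : Int) (H : Int) (W : Int) (out_H : Int) (out_W : Int) (kH : Int) (kW : Int), Dom_infer_lines_py b H W out_H out_W kH kW → Pre_infer_lines_py b H W out_H out_W kH kW → Spec_infer_lines_py b H W out_H out_W kH kW (infer_lines_py b H W out_H out_W kH kW)

-- ===== LEMMAS AND PROOFS =====

-- the loop from 2^k computes 2^(bitLength t - 1), the largest power of two ≤ t
theorem loop_pow (t : Int) (ht : 2 ≤ t) :
    ∀ (n k : Nat), PySem.Int.bitLength t - 1 - k = n → (2 : Int) ^ k ≤ t →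
      inferLinesLoop t (2 ^ k) = 2 ^ (PySem.Int.bitLength t - 1) := by
  have htne : t ≠ 0 := by omega
  have hub : t.natAbs < 2 ^ PySem.Int.bitLength t := PySem.Int.lt_two_pow_bitLength t
  have hlb : 2 ^ (PySem.Int.bitLength t - 1) ≤ t.natAbs := PySem.Int.two_pow_bitLength_le t htne
  have hNA : (t.natAbs : Int) = t := Int.natAbs_of_nonneg (by omega)
  intro n
  induction n with
  | zero =>
      intro k hn hk
      have hkN : (2 : Nat) ^ k ≤ t.natAbs := by
        have h1 : (((2 : Nat) ^ k : Nat) : Int) ≤ ((t.natAbs : Nat) : Int) := by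
          rw [hNA]; push_cast; exact hk
        exact_mod_cast h1
      have hL1 : 1 ≤ PySem.Int.bitLength t := by
        by_contra h
        have : PySem.Int.bitLength t = 0 := by omega
        rw [this] at hub; simp at hub; omega
      have hkL : k < PySem.Int.bitLength t := by
        have : (2 : Nat) ^ k < 2 ^ PySem.Int.bitLength t := lt_of_le_of_lt hkN hub
        exact (Nat.pow_lt_pow_iff_right (by norm_num)).mp this
      have hkeq : k = PySem.Int.bitLength t - 1 := by omega
      have hstop : t < 2 * (2 : Int) ^ k := by
        have h2 : t.natAbs < 2 ^ (k + 1) := by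
          have : PySem.Int.bitLength t = k + 1 := by omega
          rw [this] at hub; exact hub
        have h3 : (t.natAbs : Int) < (((2 : Nat) ^ (k + 1) : Nat) : Int) := by exact_mod_cast h2
        rw [hNA] at h3; push_cast at h3
        calc t < (2:Int) ^ (k+1) := h3
          _ = 2 * 2 ^ k := by ring
      rw [inferLinesLoop]
      rw [if_pos (Or.inl hstop), hkeq]
  | succ n ih =>
      intro k hn hk
      have hk1 : k + 1 ≤ PySem.Int.bitLength t - 1 := by omega
      have hnext : (2 : Int) ^ (k + 1) ≤ t := by
        have h1 : (2 : Nat) ^ (k + 1) ≤ 2 ^ (PySem.Int.bitLength t - 1) :=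
          Nat.pow_le_pow_right (by norm_num) hk1
        have h2 : (2 : Nat) ^ (k + 1) ≤ t.natAbs := le_trans h1 hlb
        have h3 : (((2 : Nat) ^ (k + 1) : Nat) : Int) ≤ (t.natAbs : Int) := by exact_mod_cast h2
        rw [hNA] at h3; push_cast at h3; exact h3
      have hpos : (0 : Int) < 2 ^ k := by positivity
      rw [inferLinesLoop]
      rw [if_neg (by
        push Not
        exact ⟨by rw [show (2 : Int) * 2 ^ k = 2 ^ (k + 1) by ring]; exact hnext, hpos⟩)]
      have h2k : 2 * (2 : Int) ^ k = 2 ^ (k + 1) := by ring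
      rw [h2k]
      exact ih (k + 1) (by omega) hnext

theorem loop_closed (t : Int) :
    inferLinesLoop t 1 = 2 ^ (PySem.Int.bitLength (max t 1) - 1) := by
  by_cases ht : 2 ≤ t
  · have hmax : max t 1 = t := by omega
    rw [hmax]
    have h1 : inferLinesLoop t ((2 : Int) ^ 0) = 2 ^ (PySem.Int.bitLength t - 1) :=
      loop_pow t ht (PySem.Int.bitLength t - 1 - 0) 0 rfl (by simpa using by omega)
    simpa using h1
  · have hmax : max t 1 = 1 := by omega
    rw [hmax]
    rw [inferLinesLoop]
    rw [if_pos (Or.inl (by omega))]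
    decide

-- ===== VERDICT (by name: the statement is the Claim_ definition above) =====
theorem infer_lines_py_spec : Claim_equal_infer_lines_py := by
  intro b H W out_H out_W kH kW _ _
  unfold Spec_infer_lines_py infer_lines_py infer_lines_py_alt
  have h17 : (2 : Int) ^ 17 = 131072 := by norm_num
  simp only [h17]
  by_cases h : PySem.Int.floordiv 131072
      (b * (PySem.Int.floordiv (H * W) out_H + kH * kW * out_W)) < out_H
  · rw [if_pos h, if_neg (by omega)]
    exact loop_closed _
  · rw [if_neg h, if_pos (by omega)]
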